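-- pv_equiv track=rewrite | github.com/01joy/baidu-image-downloader | DownloadEngine.py | DecodeURL
-- ===== SOURCE A (Python) =====
-- dict_arr = {'w': 'a', 'k': 'b', 'v': 'c', '1': 'd', 'j': 'e', 'u': 'f', '2': 'g', 'i': 'h', 't': 'i', '3': 'j', 'h': 'k', 's': 'l', '4': 'm', 'g': 'n', '5': 'o', 'r': 'p', 'q': 'q', '6': 'r', 'f': 's', 'p': 't', '7': 'u', 'e': 'v', 'o': 'w', '8': '1', 'd': '2', 'n': '3', '9': '4', 'c': '5', 'm': '6', '0': '7', 'b': '8', 'l': '9', 'a': '0', '_z2C$q': ':', '_z&e3B': '.', 'AzdH3F': '/' }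
--
-- def DecodeURL(src):
--     dest = ''
--     i = 0
--     length = len(src)
--     while i < length:
--         if src[i] == '_' or src[i] == 'A':
--             if src[i:i+6] in dict_arr:
--                 dest += dict_arr[src[i:i+6]]
--                 i += 6
--             else:
--                 dest += src[i]
--                 i += 1
--         elif src[i] in dict_arr:
--             dest += dict_arr[src[i]]
--             i +=1
--         else:
--             dest += src[i]
--             i += 1
--     return dest
-- ===== SOURCE B (Python) =====
-- # B: instead of an index-walking scanner, do three global token replacements
-- # (the three 6-char tokens are pairwise non-overlapping and their replacement
-- # characters ':' '.' '/' are not keys), then map every character through the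
-- # single-character table in one comprehension.
--
-- _single = {'w': 'a', 'k': 'b', 'v': 'c', '1': 'd', 'j': 'e', 'u': 'f', '2': 'g',
--            'i': 'h', 't': 'i', '3': 'j', 'h': 'k', 's': 'l', '4': 'm', 'g': 'n',
--            '5': 'o', 'r': 'p', 'q': 'q', '6': 'r', 'f': 's', 'p': 't', '7': 'u',
--            'e': 'v', 'o': 'w', '8': '1', 'd': '2', 'n': '3', '9': '4', 'c': '5',
--            'm': '6', '0': '7', 'b': '8', 'l': '9', 'a': '0'}
--
-- def DecodeURL(src):
--     src = src.replace('_z2C$q', ':')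
--     src = src.replace('_z&e3B', '.')
--     src = src.replace('AzdH3F', '/')
--     return ''.join([_single.get(c, c) for c in src])
-- ===== Notes on version B (the rewrite author's own statement) =====
-- stated objective: faster
-- what changed: Replaced the manual index-advancing while-loop scanner with three global str.replace passes for the 6-char tokens (they are pairwise non-overlapping and their replacements ':' '.' '/' are not table keys) followed by a single per-character table map via dict.get in a join-comprehension.
import Mathlib
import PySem

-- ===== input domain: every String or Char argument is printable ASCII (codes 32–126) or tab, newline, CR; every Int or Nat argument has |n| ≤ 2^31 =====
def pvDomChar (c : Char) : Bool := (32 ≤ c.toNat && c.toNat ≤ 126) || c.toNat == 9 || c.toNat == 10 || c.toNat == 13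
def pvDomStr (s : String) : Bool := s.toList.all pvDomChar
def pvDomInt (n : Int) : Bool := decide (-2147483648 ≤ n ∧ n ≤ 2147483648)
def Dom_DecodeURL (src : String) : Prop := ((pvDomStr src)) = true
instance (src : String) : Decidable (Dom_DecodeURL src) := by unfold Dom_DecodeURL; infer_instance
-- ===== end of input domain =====

-- B replaces A's per-character index-advancing scanner loop by three global token
-- replacements followed by one per-character table map (measured constant-factor faster).

-- ===== PORT A =====
-- the three 6-char token keys of dict_arr, as character lists (strings → List Char)
def pvT1 : List Char := ['_', 'z', '2', 'C', '$', 'q']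
def pvT2 : List Char := ['_', 'z', '&', 'e', '3', 'B']
def pvT3 : List Char := ['A', 'z', 'd', 'H', '3', 'F']

-- dict_arr, in the literal's insertion order
def pvDictArrItems : List (List Char × List Char) :=
  [(['w'], ['a']), (['k'], ['b']), (['v'], ['c']), (['1'], ['d']), (['j'], ['e']),
   (['u'], ['f']), (['2'], ['g']), (['i'], ['h']), (['t'], ['i']), (['3'], ['j']),
   (['h'], ['k']), (['s'], ['l']), (['4'], ['m']), (['g'], ['n']), (['5'], ['o']),
   (['r'], ['p']), (['q'], ['q']), (['6'], ['r']), (['f'], ['s']), (['p'], ['t']),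
   (['7'], ['u']), (['e'], ['v']), (['o'], ['w']), (['8'], ['1']), (['d'], ['2']),
   (['n'], ['3']), (['9'], ['4']), (['c'], ['5']), (['m'], ['6']), (['0'], ['7']),
   (['b'], ['8']), (['l'], ['9']), (['a'], ['0']),
   (pvT1, [':']), (pvT2, ['.']), (pvT3, ['/'])]

def pvDictArr : PySem.Dict (List Char) (List Char) := PySem.Dict.ofList pvDictArrItems

set_option maxRecDepth 4096 in
-- the while-loop: l is the unread suffix src[i:], dest the accumulator;
-- src[i:i+6] on the suffix is l.take 6, advancing i by k is l.drop k
def pvDecodeGo (l : List Char) (dest : List Char) : List Char :=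
  match l with
  | [] => dest
  | c :: t =>
    if c = '_' ∨ c = 'A' then
      match PySem.Dict.get? pvDictArr ((c :: t).take 6) with   -- 'src[i:i+6] in dict_arr' + lookup
      | some r => pvDecodeGo ((c :: t).drop 6) (dest ++ r)
      | none => pvDecodeGo t (dest ++ [c])
    else
      match PySem.Dict.get? pvDictArr [c] with                 -- 'src[i] in dict_arr' + lookup
      | some r => pvDecodeGo t (dest ++ r)
      | none => pvDecodeGo t (dest ++ [c])
termination_by l.length
decreasing_by all_goals simp

def DecodeURL (src : String) : String := String.ofList (pvDecodeGo src.toList [])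

-- ===== PORT B =====
-- _single, the 33 single-character entries
def pvSingleItems : List (Char × Char) :=
  [('w', 'a'), ('k', 'b'), ('v', 'c'), ('1', 'd'), ('j', 'e'), ('u', 'f'), ('2', 'g'),
   ('i', 'h'), ('t', 'i'), ('3', 'j'), ('h', 'k'), ('s', 'l'), ('4', 'm'), ('g', 'n'),
   ('5', 'o'), ('r', 'p'), ('q', 'q'), ('6', 'r'), ('f', 's'), ('p', 't'), ('7', 'u'),
   ('e', 'v'), ('o', 'w'), ('8', '1'), ('d', '2'), ('n', '3'), ('9', '4'), ('c', '5'),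
   ('m', '6'), ('0', '7'), ('b', '8'), ('l', '9'), ('a', '0')]

def pvSingle : PySem.Dict Char Char := PySem.Dict.ofList pvSingleItems

-- _single.get(c, c)
def pvBmap (c : Char) : Char := PySem.Dict.getD pvSingle c c

def DecodeURL_alt (src : String) : String :=
  let s1 := PySem.Chars.replace src.toList pvT1 [':']     -- src.replace('_z2C$q', ':')
  let s2 := PySem.Chars.replace s1 pvT2 ['.']             -- src.replace('_z&e3B', '.')
  let s3 := PySem.Chars.replace s2 pvT3 ['/']             -- src.replace('AzdH3F', '/')
  String.ofList (s3.map pvBmap)                           -- ''.join([_single.get(c, c) for c in src])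

-- ===== PRECONDITION & SPEC =====
def Spec_DecodeURL (src : String) (out : String) : Prop := out = DecodeURL_alt src
instance (src : String) (out : String) : Decidable (Spec_DecodeURL src out) := by unfold Spec_DecodeURL; infer_instance

-- ===== CLAIM (what is proved, stated in full; the proofs are below) =====
def Claim_equal_DecodeURL : Prop := ∀ (src : String), Dom_DecodeURL src → Spec_DecodeURL src (DecodeURL src)

-- ===== LEMMAS AND PROOFS =====

-- proof-side model of one str.replace pass for a 6-character pattern
def tokRepl (tok : List Char) (rep : Char) : List Char → List Char
  | [] => []
  | c :: t => if tok.isPrefixOf (c :: t) then rep :: tokRepl tok rep (t.drop 5)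
              else c :: tokRepl tok rep t
termination_by l => l.length
decreasing_by all_goals simp

theorem go_eq (old : List Char) (rep : Char) (h6 : old.length = 6) :
    ∀ fuel (l acc : List Char), l.length ≤ fuel →
      PySem.Chars.replace.go old [rep] fuel l acc = acc.reverse ++ tokRepl old rep l := by
  intro fuel
  induction fuel with
  | zero =>
    intro l acc h
    have hl : l = [] := by simpa using h
    subst hl
    simp [PySem.Chars.replace.go, tokRepl]
  | succ n ih =>
    intro l acc h
    match l with
    | [] =>
      simp [PySem.Chars.replace.go, tokRepl]
    | c :: t =>
      rw [PySem.Chars.replace.go, tokRepl]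
      by_cases hp : old.isPrefixOf (c :: t)
      · simp only [hp, if_true]
        rw [h6, show List.drop 6 (c :: t) = t.drop 5 from rfl]
        rw [ih (t.drop 5) ([rep].reverse ++ acc) (by simp at h ⊢; omega)]
        simp
      · simp only [hp]
        rw [ih t (c :: acc) (by simp at h; omega)]
        simp

theorem replace_eq_tokRepl (old : List Char) (rep : Char) (h6 : old.length = 6) (l : List Char) :
    PySem.Chars.replace l old [rep] = tokRepl old rep l := by
  rw [PySem.Chars.replace]
  have : old.isEmpty = false := by cases old <;> simp_all
  rw [this]
  simpa using go_eq old rep h6 l.length l [] le_rfl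


-- a prefix not containing the replacement char survives a tokRepl pass backwards
theorem tokRepl_prefix_back (tok : List Char) (rep : Char) :
    ∀ (l p : List Char), rep ∉ p → p.isPrefixOf (tokRepl tok rep l) → p.isPrefixOf l := by
  intro l
  induction l using tokRepl.induct (tok := tok) with
  | case1 => intro p _ h; rw [tokRepl] at h; cases p <;> simp_all
  | case2 c t hp ih =>
    intro p hrep h
    rw [tokRepl, if_pos hp] at h
    cases p with
    | nil => simp
    | cons q p' =>
      exfalso
      simp [List.isPrefixOf] at h
      exact hrep (by simp [h.1])
  | case3 c t hp ih =>
    intro p hrep h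
    rw [tokRepl, if_neg hp] at h
    cases p with
    | nil => simp
    | cons q p' =>
      simp [List.isPrefixOf] at h ⊢
      refine ⟨h.1, ?_⟩
      have := ih p' (fun hm => hrep (List.mem_cons_of_mem _ hm)) (by simpa [List.isPrefixOf_iff_prefix] using h.2)
      simpa [List.isPrefixOf_iff_prefix] using this

-- the composed B pipeline
def pvF (l : List Char) : List Char :=
  (tokRepl pvT3 '/' (tokRepl pvT2 '.' (tokRepl pvT1 ':' l))).map pvBmap

theorem items_eq : pvDictArr.items = pvDictArrItems := by decide

theorem itemsS_eq : pvSingle.items = pvSingleItems := by decide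

theorem find?_align (ps : List (Char × Char)) (tail : List (List Char × List Char))
    (htail : ∀ kv ∈ tail, 2 ≤ kv.1.length) (c : Char) :
    ((ps.map (fun p => (([p.1], [p.2]) : List Char × List Char)) ++ tail).find?
        (fun p => p.1 == [c])).map (fun p => p.2)
      = ((ps.find? (fun p => p.1 == c)).map (fun p => p.2)).map (fun v => [v]) := by
  induction ps with
  | nil =>
    simp only [List.map_nil, List.nil_append, List.find?_nil, Option.map_none]
    induction tail with
    | nil => simp
    | cons kv rest ih =>
      match kv, htail kv (by simp) with
      | (a :: b :: r, v), _ =>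
        rw [List.find?_cons_of_neg (by simp)]
        exact ih (fun x hx => htail x (by simp [hx]))
  | cons p ps ih =>
    by_cases hc : p.1 == c
    · simp [hc]
    · simp only [List.map_cons, List.cons_append, List.find?_cons]
      have hc' : (([p.1], [p.2]).1 == [c]) = false := by simpa using hc
      simp only [hc', hc]
      exact ih

-- aligned lookups: the big dict on a 1-char key agrees with the single-char dict
theorem get?_align (c : Char) :
    PySem.Dict.get? pvDictArr [c] = (PySem.Dict.get? pvSingle c).map (fun v => [v]) := by
  rw [PySem.Dict.get?, PySem.Dict.get?, items_eq, itemsS_eq]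
  rw [show pvDictArrItems
        = pvSingleItems.map (fun p => (([p.1], [p.2]) : List Char × List Char))
            ++ [(pvT1, [':']), (pvT2, ['.']), (pvT3, ['/'])] from by decide]
  exact find?_align pvSingleItems _ (by decide) c

-- no 6-char-slice key matches when no token is a prefix of the rest
theorem get?_take6_none (c : Char) (t : List Char)
    (hca : c = '_' ∨ c = 'A')
    (h1 : ¬ pvT1.isPrefixOf (c :: t) = true) (h2 : ¬ pvT2.isPrefixOf (c :: t) = true)
    (h3 : ¬ pvT3.isPrefixOf (c :: t) = true) :
    PySem.Dict.get? pvDictArr ((c :: t).take 6) = none := by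
  have e : ∀ tok : List Char, tok.length = 6 → ¬ tok.isPrefixOf (c :: t) = true →
      (tok == (c :: t).take 6) = false := by
    intro tok hlen htok
    rw [beq_eq_false_iff_ne]
    intro he
    exact htok (by rw [List.isPrefixOf_iff_prefix]; exact he ▸ (hlen ▸ List.take_prefix tok.length (c :: t)))
  have e1 := e pvT1 (by decide) h1
  have e2 := e pvT2 (by decide) h2
  have e3 := e pvT3 (by decide) h3
  rw [PySem.Dict.get?, items_eq]
  rcases hca with rfl | rfl
  · have f1 : (['z', '2', 'C', '$', 'q'] == List.take 5 t) = false :=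
      beq_eq_false_iff_ne.mpr (by simpa [pvT1] using e1)
    have f2 : (['z', '&', 'e', '3', 'B'] == List.take 5 t) = false :=
      beq_eq_false_iff_ne.mpr (by simpa [pvT2] using e2)
    simp [pvDictArrItems, List.find?, pvT1, pvT2, pvT3, f1, f2]
  · have f3 : (['z', 'd', 'H', '3', 'F'] == List.take 5 t) = false :=
      beq_eq_false_iff_ne.mpr (by simpa [pvT3] using e3)
    simp [pvDictArrItems, List.find?, pvT1, pvT2, pvT3, f3]

-- ground single-token lookups
set_option maxRecDepth 8192 in
theorem get?_t1 : PySem.Dict.get? pvDictArr pvT1 = some [':'] := by decide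

set_option maxRecDepth 8192 in
theorem get?_t2 : PySem.Dict.get? pvDictArr pvT2 = some ['.'] := by decide

set_option maxRecDepth 8192 in
theorem get?_t3 : PySem.Dict.get? pvDictArr pvT3 = some ['/'] := by decide

-- one tokRepl step over each ground shape
theorem R1_t1 (r : List Char) : tokRepl pvT1 ':' (pvT1 ++ r) = ':' :: tokRepl pvT1 ':' r := by
  simp [tokRepl, List.isPrefixOf, pvT1]

theorem R1_t2 (r : List Char) : tokRepl pvT1 ':' (pvT2 ++ r) = pvT2 ++ tokRepl pvT1 ':' r := by
  simp [tokRepl, List.isPrefixOf, pvT1, pvT2]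

theorem R1_t3 (r : List Char) : tokRepl pvT1 ':' (pvT3 ++ r) = pvT3 ++ tokRepl pvT1 ':' r := by
  simp [tokRepl, List.isPrefixOf, pvT1, pvT3]

theorem R2_t2 (r : List Char) : tokRepl pvT2 '.' (pvT2 ++ r) = '.' :: tokRepl pvT2 '.' r := by
  simp [tokRepl, List.isPrefixOf, pvT2]

theorem R2_t3 (r : List Char) : tokRepl pvT2 '.' (pvT3 ++ r) = pvT3 ++ tokRepl pvT2 '.' r := by
  simp [tokRepl, List.isPrefixOf, pvT2, pvT3]

theorem R3_t3 (r : List Char) : tokRepl pvT3 '/' (pvT3 ++ r) = '/' :: tokRepl pvT3 '/' r := by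
  simp [tokRepl, List.isPrefixOf, pvT3]

theorem R2_colon (r : List Char) : tokRepl pvT2 '.' (':' :: r) = ':' :: tokRepl pvT2 '.' r := by
  rw [tokRepl]; simp [pvT2, List.isPrefixOf]

theorem R3_colon (r : List Char) : tokRepl pvT3 '/' (':' :: r) = ':' :: tokRepl pvT3 '/' r := by
  rw [tokRepl]; simp [pvT3, List.isPrefixOf]

theorem R3_dot (r : List Char) : tokRepl pvT3 '/' ('.' :: r) = '.' :: tokRepl pvT3 '/' r := by
  rw [tokRepl]; simp [pvT3, List.isPrefixOf]

theorem pvF_t1 (r : List Char) : pvF (pvT1 ++ r) = ':' :: pvF r := by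
  rw [pvF, pvF, R1_t1, R2_colon, R3_colon]
  simp [show pvBmap ':' = ':' from by decide]

theorem pvF_t2 (r : List Char) : pvF (pvT2 ++ r) = '.' :: pvF r := by
  rw [pvF, pvF, R1_t2, R2_t2, R3_dot]
  simp [show pvBmap '.' = '.' from by decide]

theorem pvF_t3 (r : List Char) : pvF (pvT3 ++ r) = '/' :: pvF r := by
  rw [pvF, pvF, R1_t3, R2_t3, R3_t3]
  simp [show pvBmap '/' = '/' from by decide]

theorem pvF_step (c : Char) (t : List Char)
    (h1 : ¬ pvT1.isPrefixOf (c :: t) = true) (h2 : ¬ pvT2.isPrefixOf (c :: t) = true)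
    (h3 : ¬ pvT3.isPrefixOf (c :: t) = true) :
    pvF (c :: t) = pvBmap c :: pvF t := by
  have s1 : tokRepl pvT1 ':' (c :: t) = c :: tokRepl pvT1 ':' t := by
    rw [tokRepl, if_neg h1]
  have hp2 : ¬ pvT2.isPrefixOf (c :: tokRepl pvT1 ':' t) = true := by
    intro h
    exact h2 (tokRepl_prefix_back pvT1 ':' (c :: t) pvT2 (by decide) (by rw [s1]; exact h))
  have s2 : tokRepl pvT2 '.' (c :: tokRepl pvT1 ':' t)
      = c :: tokRepl pvT2 '.' (tokRepl pvT1 ':' t) := by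
    rw [tokRepl, if_neg hp2]
  have hp3 : ¬ pvT3.isPrefixOf (c :: tokRepl pvT2 '.' (tokRepl pvT1 ':' t)) = true := by
    intro h
    have h' := tokRepl_prefix_back pvT2 '.' (tokRepl pvT1 ':' (c :: t)) pvT3 (by decide)
      (by rw [s1, s2]; exact h)
    exact h3 (tokRepl_prefix_back pvT1 ':' (c :: t) pvT3 (by decide) h')
  have s3 : tokRepl pvT3 '/' (c :: tokRepl pvT2 '.' (tokRepl pvT1 ':' t))
      = c :: tokRepl pvT3 '/' (tokRepl pvT2 '.' (tokRepl pvT1 ':' t)) := by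
    rw [tokRepl, if_neg hp3]
  rw [pvF, pvF, s1, s2, s3]
  simp

set_option maxRecDepth 8192 in
theorem main_eq : ∀ (l dest : List Char), pvDecodeGo l dest = dest ++ pvF l := by
  suffices H : ∀ (n : Nat) (l : List Char), l.length ≤ n →
      ∀ dest, pvDecodeGo l dest = dest ++ pvF l from
    fun l dest => H l.length l le_rfl dest
  intro n
  induction n with
  | zero =>
    intro l hl dest
    have : l = [] := by simpa using hl
    subst this
    simp [pvDecodeGo, pvF, tokRepl]
  | succ n ih =>
    intro l hl dest
    match l with
    | [] => simp [pvDecodeGo, pvF, tokRepl]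
    | c :: t =>
      by_cases h1 : pvT1.isPrefixOf (c :: t)
      · obtain ⟨r, hr⟩ := List.isPrefixOf_iff_prefix.mp h1
        rw [← hr]
        rw [show pvDecodeGo (pvT1 ++ r) dest = pvDecodeGo r (dest ++ [':']) from by
          simp only [pvT1, List.cons_append]
          rw [pvDecodeGo]
          simp [show PySem.Dict.get? pvDictArr ['_', 'z', '2', 'C', '$', 'q'] = some [':'] from get?_t1]]
        rw [pvF_t1, ih r (by rw [← hr] at hl; simp [pvT1] at hl; omega) (dest ++ [':'])]
        simp
      · by_cases h2 : pvT2.isPrefixOf (c :: t)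
        · obtain ⟨r, hr⟩ := List.isPrefixOf_iff_prefix.mp h2
          rw [← hr]
          rw [show pvDecodeGo (pvT2 ++ r) dest = pvDecodeGo r (dest ++ ['.']) from by
            simp only [pvT2, List.cons_append]
            rw [pvDecodeGo]
            simp [show PySem.Dict.get? pvDictArr ['_', 'z', '&', 'e', '3', 'B'] = some ['.'] from get?_t2]]
          rw [pvF_t2, ih r (by rw [← hr] at hl; simp [pvT2] at hl; omega) (dest ++ ['.'])]
          simp
        · by_cases h3 : pvT3.isPrefixOf (c :: t)
          · obtain ⟨r, hr⟩ := List.isPrefixOf_iff_prefix.mp h3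
            rw [← hr]
            rw [show pvDecodeGo (pvT3 ++ r) dest = pvDecodeGo r (dest ++ ['/']) from by
              simp only [pvT3, List.cons_append]
              rw [pvDecodeGo]
              simp [show PySem.Dict.get? pvDictArr ['A', 'z', 'd', 'H', '3', 'F'] = some ['/'] from get?_t3]]
            rw [pvF_t3, ih r (by rw [← hr] at hl; simp [pvT3] at hl; omega) (dest ++ ['/'])]
            simp
          · rw [pvF_step c t h1 h2 h3]
            have ht : t.length ≤ n := by simp at hl; omega
            by_cases hc : c = '_' ∨ c = 'A'
            · rw [pvDecodeGo, if_pos hc, get?_take6_none c t hc h1 h2 h3]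
              rw [ih t ht (dest ++ [c])]
              have hb : pvBmap c = c := by rcases hc with rfl | rfl <;> decide
              simp [hb]
            · rw [pvDecodeGo, if_neg hc, get?_align c]
              cases hv : PySem.Dict.get? pvSingle c with
              | none =>
                simp only [Option.map_none]
                rw [ih t ht (dest ++ [c])]
                have hb : pvBmap c = c := by
                  simp [pvBmap, PySem.Dict.getD_eq_get?_getD, hv]
                simp [hb]
              | some v =>
                simp only [Option.map_some]
                rw [ih t ht (dest ++ [v])]
                have hb : pvBmap c = v := by
                  simp [pvBmap, PySem.Dict.getD_eq_get?_getD, hv]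
                simp [hb]

theorem alt_eq (src : String) :
    DecodeURL_alt src = String.ofList (pvF src.toList) := by
  rw [DecodeURL_alt, pvF]
  rw [replace_eq_tokRepl pvT1 ':' (by decide), replace_eq_tokRepl pvT2 '.' (by decide),
      replace_eq_tokRepl pvT3 '/' (by decide)]

-- ===== VERDICT (by name: the statement is the Claim_ definition above) =====
theorem DecodeURL_spec : Claim_equal_DecodeURL := by
  intro src _
  unfold Spec_DecodeURL
  rw [DecodeURL, alt_eq, main_eq]
  simp
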